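-- pv_equiv track=rewrite | github.com/Thevic16/programming-projects-itt | data-structure-course-homework/tarea #1 estructura/max_pair_product/venv/main2.py | max_pair_product
-- ===== SOURCE A (Python) =====
-- def max_pair_product(a):
--     # Get length of array
--     n = len(a)
--     # create two variables to store the major and the second major
--     mayor = 0
--     segundo_mayor = 0
--
--     # Iterate over all elements and make place comparisons
--     for i in range(n):
--         if(a[i] > segundo_mayor):
--             segundo_mayor = a[i]
--             if(segundo_mayor>mayor):
--                 temp = mayor
--                 mayor = segundo_mayor
--                 segundo_mayor = temp
--
--
--     # Return max product
--     return mayor*segundo_mayor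
-- ===== SOURCE B (Python) =====
-- def max_pair_product(a):
--     # Sort-then-select: A clamps both tracked maxima at 0 (they start at 0),
--     # so the answer is the product of the two largest values of the input
--     # extended with two zeros.  list(a) keeps the argument unmutated.
--     vals = sorted(list(a) + [0, 0])
--     return vals[-1] * vals[-2]
-- ===== Notes on version B (the rewrite author's own statement) =====
-- stated objective: simpler
-- what changed: Replaces the single-pass top-2 tracking loop (with its swap logic and zero-initialised registers) by sort-then-select: sort the values together with the two zero starting values and multiply the last two entries.
import Mathlib
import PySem

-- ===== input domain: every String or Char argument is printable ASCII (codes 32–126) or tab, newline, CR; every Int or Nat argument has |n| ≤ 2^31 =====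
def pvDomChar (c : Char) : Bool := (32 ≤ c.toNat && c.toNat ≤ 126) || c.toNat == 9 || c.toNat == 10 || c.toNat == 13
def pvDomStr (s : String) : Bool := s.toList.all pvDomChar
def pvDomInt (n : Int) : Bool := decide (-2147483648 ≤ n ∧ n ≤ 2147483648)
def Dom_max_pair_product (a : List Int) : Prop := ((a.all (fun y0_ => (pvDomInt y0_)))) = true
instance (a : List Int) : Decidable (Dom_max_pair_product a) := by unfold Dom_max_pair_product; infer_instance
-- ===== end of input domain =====

-- B replaces A's single-pass top-2 tracking loop by sort-then-select over the values
-- extended with A's two zero starting values; return values proved equal on all inputs.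


-- ===== PORT A =====
-- one loop iteration: state = (mayor, segundo_mayor)
def mppStep (s : Int × Int) (x : Int) : Int × Int :=
  if x > s.2 then
    -- segundo_mayor = a[i]; then swap with mayor if it now exceeds it
    if x > s.1 then (x, s.1) else (s.1, x)
  else s

def max_pair_product (a : List Int) : Int :=
  -- for i in range(n): … over a[i] is a left fold over a
  let s := a.foldl mppStep (0, 0)
  s.1 * s.2

-- ===== PORT B =====
def max_pair_product_alt (a : List Int) : Int :=
  let vals := PySem.List.sorted (a ++ [0, 0]) (fun x => x) false
  -- vals[-1] * vals[-2]; both indices are in range since vals has length ≥ 2,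
  -- so the .getD 0 defaults are never used
  ((PySem.List.pyGet? vals (-1)).getD 0) * ((PySem.List.pyGet? vals (-2)).getD 0)

-- ===== PRECONDITION & SPEC =====
def Spec_max_pair_product (a : List Int) (out : Int) : Prop := out = max_pair_product_alt a
instance (a : List Int) (out : Int) : Decidable (Spec_max_pair_product a out) := by unfold Spec_max_pair_product; infer_instance

-- ===== CLAIM (what is proved, stated in full; the proofs are below) =====
def Claim_equal_max_pair_product : Prop := ∀ (a : List Int), Dom_max_pair_product a → Spec_max_pair_product a (max_pair_product a)

-- ===== LEMMAS AND PROOFS =====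

-- last two elements of a list (length ≥ 2): (last, second-to-last)
def lastTwo : List Int → Int × Int
  | [] => (0, 0)
  | [x] => (x, 0)
  | [x, y] => (y, x)
  | _ :: y :: z :: t => lastTwo (y :: z :: t)

theorem lastTwo_cons_of_le (y : Int) (u : List Int) (h : 2 ≤ u.length) :
    lastTwo (y :: u) = lastTwo u := by
  match u, h with
  | p :: q :: t, _ => simp [lastTwo]

theorem lastTwo_append (u : List Int) (p q : Int) : lastTwo (u ++ [p, q]) = (q, p) := by
  induction u with
  | nil => rfl
  | cons y u ih => rw [List.cons_append, lastTwo_cons_of_le y _ (by simp), ih]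

theorem snd_lastTwo_ge_head :
    ∀ (t : List Int) (a b : Int), (a :: b :: t).Pairwise (· ≤ ·) → a ≤ (lastTwo (a :: b :: t)).2 := by
  intro t
  induction t with
  | nil => intro a b h; simp [lastTwo]
  | cons c t ih =>
    intro a b h
    have hab : a ≤ b := (List.pairwise_cons.1 h).1 _ (by simp)
    have := ih b c (List.pairwise_cons.1 h).2
    calc a ≤ b := hab
      _ ≤ (lastTwo (b :: c :: t)).2 := this
      _ = (lastTwo (a :: b :: c :: t)).2 := by rw [lastTwo_cons_of_le a _ (by simp)]

theorem lastTwo_orderedInsert (x : Int) :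
    ∀ (s : List Int), s.Pairwise (· ≤ ·) → 2 ≤ s.length →
      lastTwo (List.orderedInsert (· ≤ ·) x s) = mppStep (lastTwo s) x := by
  intro s
  induction s with
  | nil => intro _ h; simp at h
  | cons a t ih =>
    intro hs hl
    match t, hs, hl, ih with
    | b :: t, hs, _, ih =>
      by_cases hxa : x ≤ a
      · rw [List.orderedInsert, if_pos hxa,
          lastTwo_cons_of_le x _ (by simp)]
        have h2 := snd_lastTwo_ge_head t a b hs
        have : ¬ x > (lastTwo (a :: b :: t)).2 := by omega
        simp [mppStep, this]
      · rw [List.orderedInsert, if_neg hxa]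
        match t with
        | [] =>
          have hax : a < x := lt_of_not_ge hxa
          by_cases hxb : x ≤ b
          · have hx : ¬ b < x := not_lt.2 hxb
            simp [List.orderedInsert, hxb, lastTwo, mppStep, hax, hx]
          · simp [List.orderedInsert, hxb, lastTwo, mppStep, hax, lt_of_not_ge hxb]
        | c :: t =>
          rw [lastTwo_cons_of_le a _ (by rw [List.orderedInsert_length]; simp),
            ih (List.pairwise_cons.1 hs).2 (by simp),
            lastTwo_cons_of_le a _ (by simp)]

-- A's loop state equals the last two entries of B's sorted combined list
theorem lastTwo_sorted_eq_foldl (a : List Int) :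
    lastTwo (PySem.List.sorted (a ++ [0, 0]) (fun x => x) false) = a.foldl mppStep (0, 0) := by
  induction a using List.reverseRecOn with
  | nil => rfl
  | append_singleton l x ih =>
    have hperm : (List.orderedInsert (· ≤ ·) x (PySem.List.sorted (l ++ [0, 0]) (fun y => y) false)).Perm
        (l ++ [x] ++ [0, 0]) := by
      have he : l ++ [x] ++ [0, 0] = l ++ x :: [0, 0] := by simp
      rw [he]
      exact (List.perm_orderedInsert _ x _).trans
        (((PySem.List.sorted_perm (l ++ [0, 0]) (fun y => y) false).cons x).trans List.perm_middle.symm)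
    have hsort : PySem.List.sorted (l ++ [x] ++ [0, 0]) (fun y => y) false
        = List.orderedInsert (· ≤ ·) x (PySem.List.sorted (l ++ [0, 0]) (fun y => y) false) :=
      PySem.List.sorted_id_eq_of_perm_of_pairwise _ _ hperm
        (List.Pairwise.orderedInsert x _ (PySem.List.sorted_pairwise (l ++ [0, 0]) (fun y => y)))
    rw [hsort, List.foldl_append, List.foldl_cons, List.foldl_nil, ← ih]
    exact lastTwo_orderedInsert x _ (PySem.List.sorted_pairwise (l ++ [0, 0]) (fun y => y))
      (by rw [PySem.List.length_sorted]; simp)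

theorem exists_last_two (s : List Int) (h : 2 ≤ s.length) : ∃ u p q, s = u ++ [p, q] := by
  match hrev : s.reverse with
  | [] => simp [← s.length_reverse, hrev] at h
  | [q] => rw [← s.reverse_reverse, hrev] at h; simp at h
  | q :: p :: r =>
    exact ⟨r.reverse, p, q, by rw [← s.reverse_reverse, hrev]; simp⟩

-- ===== VERDICT (by name: the statement is the Claim_ definition above) =====
theorem max_pair_product_spec : Claim_equal_max_pair_product := by
  intro a _
  unfold Spec_max_pair_product max_pair_product max_pair_product_alt
  have hlen : 2 ≤ (PySem.List.sorted (a ++ [0, 0]) (fun x => x) false).length := by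
    rw [PySem.List.length_sorted]; simp
  obtain ⟨u, p, q, hupq⟩ := exists_last_two _ hlen
  have hmain := lastTwo_sorted_eq_foldl a
  rw [hupq, lastTwo_append] at hmain
  have h1 : PySem.List.pyGet? (u ++ [p, q]) (-1) = some q := by
    have := PySem.List.pyGet?_neg_one_append_singleton (u ++ [p]) q
    simpa using this
  have h2 : PySem.List.pyGet? (u ++ [p, q]) (-2) = some p := by
    rw [PySem.List.pyGet?_neg_ofNat (u ++ [p, q]) 2 (by omega) (by simp)]
    rw [show (u ++ [p, q]).length - 2 = u.length by simp]
    rw [List.getElem?_append_right (le_refl _)]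
    simp
  rw [hupq]
  show (List.foldl mppStep (0, 0) a).1 * (List.foldl mppStep (0, 0) a).2
      = (PySem.List.pyGet? (u ++ [p, q]) (-1)).getD 0 * (PySem.List.pyGet? (u ++ [p, q]) (-2)).getD 0
  rw [h1, h2, ← hmain]
  rfl
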